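-- pv_equiv track=rewrite | github.com/alaniszhao/homework-files | hw3.py | patternedMessage
-- ===== SOURCE A (Python) =====
-- def patternedMessage(msg, pattern):
--     msg = msg.replace(' ','')
--     pattern = pattern.strip()
--     curr = 0
--     ret = ''
--     for p in pattern:
--         if(curr==len(msg)):
--             curr=0
--         if(p.isspace() or p=='\t' or p=='\n'):
--             ret = ret+p
--         else:
--             ret = ret + msg[curr]
--             curr+=1
--     return ret
-- ===== SOURCE B (Python) =====
-- def patternedMessage(msg, pattern):
--     m = msg.replace(' ', '')
--     pat = pattern.strip()
--     count = sum(1 for c in pat if not c.isspace())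
--     fill = '' if not m else (m * (count // len(m) + 1))[:count]
--     out = []
--     fi = 0
--     for c in pat:
--         if c.isspace():
--             out.append(c)
--         else:
--             out.append(fill[fi])
--             fi += 1
--     return ''.join(out)
-- ===== Notes on version B (the rewrite author's own statement) =====
-- stated objective: alternative
-- what changed: Instead of a single pass with a wrapping cursor into msg, B first counts the non-whitespace slots, precomputes the whole cycled fill string by repeat-and-slice, then interleaves it with the pattern's whitespace in a second pass.
import Mathlib
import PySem

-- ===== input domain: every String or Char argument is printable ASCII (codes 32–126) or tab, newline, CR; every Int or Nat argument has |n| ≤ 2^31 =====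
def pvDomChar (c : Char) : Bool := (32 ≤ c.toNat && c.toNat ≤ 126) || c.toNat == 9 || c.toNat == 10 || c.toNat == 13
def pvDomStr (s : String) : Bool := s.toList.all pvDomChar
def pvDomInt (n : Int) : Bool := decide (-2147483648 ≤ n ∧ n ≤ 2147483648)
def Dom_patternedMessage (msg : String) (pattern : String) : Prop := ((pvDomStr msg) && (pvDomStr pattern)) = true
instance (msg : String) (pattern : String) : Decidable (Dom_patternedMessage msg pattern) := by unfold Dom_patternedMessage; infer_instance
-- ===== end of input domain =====

-- B precomputes the cycled fill string (count non-space slots, repeat-and-slice) and then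
-- interleaves it with the pattern's whitespace, instead of A's single pass with a wrapping cursor.


-- ===== PORT A =====
-- loop 'for p in pattern', state (curr, ret); none = the IndexError of msg[curr]
def goA (m : List Char) : List Char → Nat → List Char → Option (List Char)
  | [], _, _ret => some _ret
  | p :: ps, curr, ret =>
    let c := if curr = m.length then 0 else curr
    if PySem.Chars.isspace p || p == '\t' || p == '\n' then
      goA m ps c (ret ++ [p])
    else
      match PySem.List.pyGet? m (c : Int) with
      | none => none  -- Python raises IndexError here (outside Pre_)
      | some ch => goA m ps (c + 1) (ret ++ [ch])

def patternedMessage (msg : String) (pattern : String) : String :=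
  let m := PySem.Chars.replace msg.toList [' '] []
  let pat := PySem.Chars.strip pattern.toList
  match goA m pat 0 [] with
  | some r => String.ofList r
  | none => ""  -- unreachable inside Pre_

-- ===== PORT B =====
-- second pass of B: interleave fill with the pattern's whitespace; none = IndexError of fill[fi]
def goB (fill : List Char) : List Char → Nat → List Char → Option (List Char)
  | [], _, _out => some _out
  | c :: ps, fi, out =>
    if PySem.Chars.isspace c then goB fill ps fi (out ++ [c])
    else
      match PySem.List.pyGet? fill (fi : Int) with
      | none => none  -- Python raises IndexError here (outside Pre_)
      | some ch => goB fill ps (fi + 1) (out ++ [ch])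

def patternedMessage_alt (msg : String) (pattern : String) : String :=
  let m := PySem.Chars.replace msg.toList [' '] []
  let pat := PySem.Chars.strip pattern.toList
  let count := (pat.filter (fun c => !PySem.Chars.isspace c)).length
  -- 'm * k' ported as flatten (replicate k m); '[:count]' as PySem slice — both exact
  let fill := if m = [] then []
              else PySem.List.slice ((List.replicate (count / m.length + 1) m).flatten) none (some (count : Int))
  match goB fill pat 0 [] with
  | some r => String.ofList r
  | none => ""  -- unreachable inside Pre_

-- ===== PRECONDITION & SPEC =====
-- Pre_ excludes exactly the inputs where A raises IndexError (msg with no non-space character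
-- while the stripped pattern is nonempty); B raises IndexError on the same inputs.
def Pre_patternedMessage (msg : String) (pattern : String) : Prop :=
  PySem.Chars.replace msg.toList [' '] [] ≠ [] ∨ PySem.Chars.strip pattern.toList = []
instance (msg : String) (pattern : String) : Decidable (Pre_patternedMessage msg pattern) := by
  unfold Pre_patternedMessage; infer_instance

def pvWitness_patternedMessage : String × String := ("hello world", "ab  cd\nef")

def Spec_patternedMessage (msg : String) (pattern : String) (out : String) : Prop := out = patternedMessage_alt msg pattern
instance (msg : String) (pattern : String) (out : String) : Decidable (Spec_patternedMessage msg pattern out) := by unfold Spec_patternedMessage; infer_instance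

-- ===== CLAIM (what is proved, stated in full; the proofs are below) =====
def Claim_equal_patternedMessage : Prop := ∀ (msg : String) (pattern : String), Dom_patternedMessage msg pattern → Pre_patternedMessage msg pattern → Spec_patternedMessage msg pattern (patternedMessage msg pattern)

-- ===== LEMMAS AND PROOFS =====

-- A's compound whitespace test is just isspace
theorem ws_eq (p : Char) :
    (PySem.Chars.isspace p || p == '\t' || p == '\n') = PySem.Chars.isspace p := by
  by_cases h1 : p = '\t'
  · subst h1; decide
  by_cases h2 : p = '\n'
  · subst h2; decide
  rw [show (p == '\t') = false from beq_eq_false_iff_ne.mpr h1,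
    show (p == '\n') = false from beq_eq_false_iff_ne.mpr h2]
  simp

-- the common rendering: i counts non-whitespace slots consumed so far
def render (m : List Char) : List Char → Nat → List Char
  | [], _ => []
  | p :: ps, i =>
    if PySem.Chars.isspace p then p :: render m ps i
    else m[i % m.length]! :: render m ps (i + 1)

theorem goA_render (m : List Char) (hm : m ≠ []) (ps : List Char) :
    ∀ (c i : Nat) (ret : List Char), c ≤ m.length → c % m.length = i % m.length →
      goA m ps c ret = some (ret ++ render m ps i) := by
  have hlen : 0 < m.length := List.length_pos_of_ne_nil hm
  induction ps with
  | nil => intro c i ret _ _; simp [goA, render]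
  | cons p ps ih =>
    intro c i ret hc hmod
    have hlt : i % m.length < m.length := Nat.mod_lt _ hlen
    have hc' : (if c = m.length then 0 else c) = i % m.length := by
      by_cases h : c = m.length
      · simp only [h, if_true]
        rw [h, Nat.mod_self] at hmod; omega
      · have hlt2 : c < m.length := by omega
        rw [if_neg h, ← hmod, Nat.mod_eq_of_lt hlt2]
    rw [goA, ws_eq]
    simp only [hc']
    by_cases hw : PySem.Chars.isspace p = true
    · rw [if_pos hw,
        ih (i % m.length) i (ret ++ [p]) (le_of_lt hlt) (Nat.mod_mod_of_dvd i dvd_rfl)]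
      simp [render, hw]
    · rw [if_neg hw]
      have hget : PySem.List.pyGet? m ((i % m.length : Nat) : Int) = some m[i % m.length] := by
        rw [PySem.List.pyGet?_natCast, List.getElem?_eq_getElem hlt]
      simp only [hget]
      have hstep : (i % m.length + 1) % m.length = (i + 1) % m.length := by
        conv_rhs => rw [Nat.add_mod]
        by_cases h1 : m.length = 1
        · simp [h1]
        · rw [Nat.mod_eq_of_lt (show 1 < m.length by omega)]
      rw [ih (i % m.length + 1) (i + 1) (ret ++ [m[i % m.length]]) (by omega) hstep]
      simp only [Bool.not_eq_true] at hw
      simp [render, hw, List.getElem!_eq_getElem?_getD, List.getElem?_eq_getElem hlt]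

-- the fill string reads as msg cycled
theorem flatten_replicate_getElem? (m : List Char) (hm : 0 < m.length) :
    ∀ (k j : Nat), j < k * m.length →
      ((List.replicate k m).flatten)[j]? = m[j % m.length]? := by
  intro k
  induction k with
  | zero => intro j hj; omega
  | succ k ih =>
    intro j hj
    rw [List.replicate_succ, List.flatten_cons]
    by_cases h : j < m.length
    · rw [List.getElem?_append_left h, Nat.mod_eq_of_lt h]
    · have hle : m.length ≤ j := by omega
      have hmul : (k + 1) * m.length = k * m.length + m.length := by ring
      rw [List.getElem?_append_right hle, ih (j - m.length) (by omega),
        Nat.mod_eq_sub_mod hle]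

theorem fill_get (m : List Char) (hm' : m ≠ []) (count j : Nat) (hj : j < count) :
    PySem.List.pyGet?
        (PySem.List.slice ((List.replicate (count / m.length + 1) m).flatten) none (some (count : Int)))
        (j : Int)
      = some (m[j % m.length]!) := by
  have hlen : 0 < m.length := List.length_pos_of_ne_nil hm'
  have hmlt : j % m.length < m.length := Nat.mod_lt _ hlen
  have hbig : j < (count / m.length + 1) * m.length := by
    have h1 := Nat.div_add_mod count m.length
    have h2 : count % m.length < m.length := Nat.mod_lt _ hlen
    have h3 : (count / m.length + 1) * m.length = (count / m.length) * m.length + m.length := by ring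
    have h4 : m.length * (count / m.length) = (count / m.length) * m.length := Nat.mul_comm _ _
    omega
  rw [PySem.List.slice_to_natCast, PySem.List.pyGet?_natCast, List.getElem?_take,
    if_pos hj, flatten_replicate_getElem? m hlen _ j hbig,
    List.getElem?_eq_getElem hmlt, List.getElem!_eq_getElem?_getD,
    List.getElem?_eq_getElem hmlt]
  rfl

theorem goB_render (m : List Char) (hm : m ≠ []) (count : Nat) (ps : List Char) :
    ∀ (fi : Nat) (out : List Char),
      fi + (ps.filter (fun c => !PySem.Chars.isspace c)).length ≤ count →
      goB (PySem.List.slice ((List.replicate (count / m.length + 1) m).flatten) none (some (count : Int)))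
          ps fi out
        = some (out ++ render m ps fi) := by
  induction ps with
  | nil => intro fi out _; simp [goB, render]
  | cons p ps ih =>
    intro fi out hle
    rw [goB]
    by_cases hw : PySem.Chars.isspace p = true
    · rw [if_pos hw, ih fi (out ++ [p]) (by
        simp only [List.filter_cons, hw, Bool.not_true] at hle
        simpa using hle)]
      simp [render, hw]
    · rw [if_neg hw]
      have hfi : fi < count := by
        simp only [List.filter_cons] at hle
        rw [if_pos (by simp only [Bool.not_eq_true] at hw; simp [hw])] at hle
        simp at hle; omega
      simp only [fill_get m hm count fi hfi]
      rw [ih (fi + 1) _ (by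
        simp only [List.filter_cons] at hle
        rw [if_pos (by simp only [Bool.not_eq_true] at hw; simp [hw])] at hle
        simp at hle ⊢; omega)]
      simp only [Bool.not_eq_true] at hw
      simp [render, hw]

-- ===== VERDICT (by name: the statement is the Claim_ definition above) =====
theorem patternedMessage_spec : Claim_equal_patternedMessage := by
  intro msg pattern _ hpre
  unfold Spec_patternedMessage patternedMessage patternedMessage_alt
  simp only []
  by_cases hne : PySem.Chars.replace msg.toList [' '] [] = []
  · rcases hpre with h | h
    · exact absurd hne h
    · simp [h, hne, goA, goB]
  · rw [goA_render _ hne _ 0 0 [] (Nat.zero_le _) rfl]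
    rw [if_neg hne]
    rw [goB_render _ hne _ _ 0 [] (by omega)]
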